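-- pv_equiv track=rewrite | github.com/cqkh42/advent-of-code | aoc_cqkh42/year_2020/day_13.py | _process
-- ===== SOURCE A (Python) =====
-- import itertools
-- from typing import Tuple
--
-- def _process(start, jump, index, num) -> Tuple[int, int]:
--     found = []
--     for t in itertools.count(start, jump):
--         if (t + index) % num == 0:
--             found.append(t)
--         if len(found) == 2:
--             break
--     return found[0], found[1] - found[0]
-- ===== SOURCE B (Python) =====
-- def _egcd(a, b):
--     # returns (g, x, y) with a*x + b*y = g = gcd(a, b)  (g >= 0 when b > 0)
--     if b == 0:
--         return a, 1, 0
--     g, x, y = _egcd(b, a % b)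
--     return g, y, x - y * (a // b)
--
--
-- def _process(start, jump, index, num):
--     m = abs(num)
--     c = (-(start + index)) % m
--     g, x, _ = _egcd(jump, m)
--     period = m // g
--     k0 = (c // g * x) % period
--     return start + k0 * jump, period * jump
-- ===== Notes on version B (the rewrite author's own statement) =====
-- stated objective: faster
-- what changed: A scans the arithmetic progression term by term until two divisible-shifted terms are found; B solves the linear congruence start + k*jump + index = 0 (mod num) directly with an extended gcd (modular inverse), returning the first solution and the period num/gcd*jump in O(log num) arithmetic.
import Mathlib
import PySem

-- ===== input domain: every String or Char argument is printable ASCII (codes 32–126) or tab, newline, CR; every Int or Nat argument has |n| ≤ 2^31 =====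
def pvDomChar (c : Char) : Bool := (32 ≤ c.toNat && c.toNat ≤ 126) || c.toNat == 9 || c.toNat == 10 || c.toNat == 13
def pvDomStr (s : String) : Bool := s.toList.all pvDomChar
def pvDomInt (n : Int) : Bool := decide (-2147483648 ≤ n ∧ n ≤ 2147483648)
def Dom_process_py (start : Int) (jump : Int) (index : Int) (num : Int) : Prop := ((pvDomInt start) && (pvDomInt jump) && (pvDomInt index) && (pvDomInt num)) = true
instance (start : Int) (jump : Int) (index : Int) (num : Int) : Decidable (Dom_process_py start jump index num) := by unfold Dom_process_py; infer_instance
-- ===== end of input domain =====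

-- B replaces A's unbounded linear scan of the arithmetic progression by solving the linear
-- congruence with an extended-gcd (modular inverse); return-value equivalence on Pre_ is proved.


-- ===== PORT A =====
-- A iterates t = start, start+jump, … appending every t with (t+index) % num == 0 until two are
-- found.  The Python loop is unbounded; the port carries fuel (2*|num|+2 suffices whenever the
-- two hits exist, which Pre_ guarantees) — fuel only makes the same computation total.
def processALoop (jump : Int) (index : Int) (num : Int) : Nat → Int → List Int → Int × Int
  | 0, _, _ => (0, 0)
  | fuel + 1, t, found =>
      let found' := if PySem.Int.mod? (t + index) num = some 0 then found ++ [t] else found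
      if found'.length = 2 then
        match found' with
        | [a, b] => (a, b - a)           -- found[0], found[1] - found[0]
        | _ => (0, 0)                    -- unreachable: length is 2
      else processALoop jump index num fuel (t + jump) found'

def process_py (start : Int) (jump : Int) (index : Int) (num : Int) : Int × Int :=
  processALoop jump index num (2 * num.natAbs + 2) start []

-- ===== PORT B =====
-- _egcd(a, b) = (g, x, y) with a*x + b*y = g
def egcdB (a : Int) (b : Int) : Int × Int × Int :=
  if h : b = 0 then (a, 1, 0)
  else
    let r := egcdB b (PySem.Int.mod a b)
    (r.1, r.2.2, r.2.1 - r.2.2 * PySem.Int.floordiv a b)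
termination_by b.natAbs
decreasing_by
  rcases lt_trichotomy b 0 with hb | hb | hb
  · have h1 := (PySem.Int.mod_neg_bounds a hb).1
    have h2 := (PySem.Int.mod_neg_bounds a hb).2
    omega
  · exact absurd hb h
  · have h1 := PySem.Int.mod_nonneg a hb
    have h2 := PySem.Int.mod_lt a hb
    omega

def process_py_alt (start : Int) (jump : Int) (index : Int) (num : Int) : Int × Int :=
  let m := |num|
  let c := PySem.Int.mod (-(start + index)) m
  let r := egcdB jump m
  let g := r.1
  let x := r.2.1
  let period := PySem.Int.floordiv m g
  let k0 := PySem.Int.mod (PySem.Int.floordiv c g * x) period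
  (start + k0 * jump, period * jump)

-- ===== PRECONDITION & SPEC =====
-- Pre_ is exactly where Python A returns: num ≠ 0 (else `% num` raises ZeroDivisionError) and the
-- congruence start + k*jump + index ≡ 0 (mod num) solvable, i.e. gcd(jump,num) ∣ start+index
-- (else A's loop never finds a term and diverges).
def Pre_process_py (start : Int) (jump : Int) (index : Int) (num : Int) : Prop :=
  num ≠ 0 ∧ (Int.gcd jump num : Int) ∣ (start + index)
instance (start : Int) (jump : Int) (index : Int) (num : Int) : Decidable (Pre_process_py start jump index num) := by unfold Pre_process_py; infer_instance

def pvWitness_process_py : Int × Int × Int × Int := (0, 3, 1, 7)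

def Spec_process_py (start : Int) (jump : Int) (index : Int) (num : Int) (out : Int × Int) : Prop := out = process_py_alt start jump index num
instance (start : Int) (jump : Int) (index : Int) (num : Int) (out : Int × Int) : Decidable (Spec_process_py start jump index num out) := by unfold Spec_process_py; infer_instance

-- ===== CLAIM (what is proved, stated in full; the proofs are below) =====
def Claim_equal_process_py : Prop := ∀ (start : Int) (jump : Int) (index : Int) (num : Int), Dom_process_py start jump index num → Pre_process_py start jump index num → Spec_process_py start jump index num (process_py start jump index num)

-- ===== LEMMAS AND PROOFS =====

theorem egcdB_zero (b : Int) : egcdB b 0 = (b, 1, 0) := by rw [egcdB]; simp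

-- extended Euclid is correct for a positive second argument
theorem egcdB_correct : ∀ (n : Nat) (a b : Int), b.natAbs = n → 0 < b →
    (egcdB a b).1 = (Int.gcd a b : Int) ∧
      a * (egcdB a b).2.1 + b * (egcdB a b).2.2 = (egcdB a b).1 := by
  intro n
  induction n using Nat.strong_induction_on with
  | _ n ih =>
    intro a b hn hb
    have hbne : b ≠ 0 := by omega
    have hmod : PySem.Int.mod a b = a % b := PySem.Int.mod_eq_emod_of_pos hb
    have hmn : (PySem.Int.mod a b).natAbs < n := by
      have h1 := PySem.Int.mod_nonneg a hb
      have h2 := PySem.Int.mod_lt a hb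
      omega
    rw [egcdB, dif_neg hbne]
    by_cases hz : PySem.Int.mod a b = 0
    · have hdvd : b ∣ a := (PySem.Int.mod_eq_zero_iff_dvd a b).1 hz
      rw [hz, egcdB_zero]
      refine ⟨?_, by ring⟩
      show (b : Int) = _
      rw [Int.gcd_comm, Int.gcd_eq_natAbs_left hdvd, Int.natAbs_of_nonneg (le_of_lt hb)]
    · have hbpos : 0 < PySem.Int.mod a b := by
        have := PySem.Int.mod_nonneg a hb; omega
      obtain ⟨hg, hbez⟩ := ih _ hmn b (PySem.Int.mod a b) rfl hbpos
      constructor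
      · rw [hg, hmod, Int.gcd_comm b (a % b), Int.gcd_emod]
      · have hfm := PySem.Int.floordiv_mul_add_mod a b
        show a * (egcdB b (PySem.Int.mod a b)).2.2 +
            b * ((egcdB b (PySem.Int.mod a b)).2.1 - (egcdB b (PySem.Int.mod a b)).2.2 * PySem.Int.floordiv a b)
            = (egcdB b (PySem.Int.mod a b)).1
        linear_combination hbez - (egcdB b (PySem.Int.mod a b)).2.2 * hfm

-- A's loop: skipping iterations with no hit
theorem loop_skip (jump index num : Int) (d : Nat) :
    ∀ (fuel : Nat) (t : Int) (found : List Int), num ≠ 0 → found.length < 2 →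
    (∀ e : Nat, e < d → ¬ num ∣ (t + (e : Int) * jump + index)) →
    processALoop jump index num (fuel + d) t found
      = processALoop jump index num fuel (t + (d : Int) * jump) found := by
  induction d with
  | zero => intro fuel t found _ _ _; simp
  | succ d ih =>
    intro fuel t found h0 hlen hno
    have hmiss : ¬ PySem.Int.mod? (t + index) num = some 0 := by
      rw [PySem.Int.mod?_eq_some_zero_iff_dvd h0]
      have := hno 0 (by omega); simpa using this
    have heq : fuel + (d + 1) = (fuel + d) + 1 := by omega
    rw [heq]
    show processALoop jump index num ((fuel + d) + 1) t found = _
    rw [processALoop]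
    simp only [hmiss, if_false]
    have hlen2 : ¬ found.length = 2 := by omega
    simp only [hlen2, if_false]
    rw [ih fuel (t + jump) found h0 hlen]
    · congr 1; push_cast; ring
    · intro e he
      have := hno (e + 1) (by omega)
      intro hc; apply this
      push_cast
      convert hc using 2
      ring

-- A's loop: a hit with empty found
theorem loop_hit1 (jump index num : Int) (fuel : Nat) (t : Int) (h0 : num ≠ 0)
    (h : num ∣ (t + index)) :
    processALoop jump index num (fuel + 1) t []
      = processALoop jump index num fuel (t + jump) [t] := by
  simp [processALoop, (PySem.Int.mod?_eq_some_zero_iff_dvd h0).2 h]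

-- A's loop: a hit with one element found returns
theorem loop_hit2 (jump index num : Int) (fuel : Nat) (t a : Int) (h0 : num ≠ 0)
    (h : num ∣ (t + index)) :
    processALoop jump index num (fuel + 1) t [a] = (a, t - a) := by
  simp [processALoop, (PySem.Int.mod?_eq_some_zero_iff_dvd h0).2 h]

theorem main_eq (start jump index num : Int) (h0 : num ≠ 0)
    (hdvd : (Int.gcd jump num : Int) ∣ (start + index)) :
    process_py start jump index num = process_py_alt start jump index num := by
  set S := start + index with hS
  set m := |num| with hm
  have hmpos : (0:Int) < m := by positivity
  set G := (egcdB jump m).1 with hG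
  set x := (egcdB jump m).2.1 with hx
  obtain ⟨hGgcd, hbez⟩ := egcdB_correct m.natAbs jump m rfl hmpos
  rw [← hG] at hGgcd
  rw [← hG, ← hx] at hbez
  have hgm : Int.gcd jump m = Int.gcd jump num := by simp [Int.gcd, hm, Int.natAbs_abs]
  have hGpos : 0 < G := by
    rw [hGgcd, hgm]
    exact_mod_cast Int.gcd_pos_of_ne_zero_right jump h0
  have hGne : G ≠ 0 := ne_of_gt hGpos
  have hGj : G ∣ jump := by rw [hGgcd]; exact Int.gcd_dvd_left jump m
  have hGm : G ∣ m := by rw [hGgcd]; exact Int.gcd_dvd_right jump m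
  have hGS : G ∣ S := by rw [hGgcd, hgm]; exact hdvd
  set c := PySem.Int.mod (-S) m with hc
  have hc0 : 0 ≤ c := PySem.Int.mod_nonneg _ hmpos
  have hcm : c < m := PySem.Int.mod_lt _ hmpos
  have hcS : m ∣ (c + S) := by
    have := PySem.Int.floordiv_mul_add_mod (-S) m
    exact ⟨-(PySem.Int.floordiv (-S) m), by linarith⟩
  have hGc : G ∣ c := by
    rcases hcS with ⟨u, hu⟩
    have : c = m * u - S := by linarith
    rw [this]
    exact dvd_sub (Dvd.dvd.mul_right hGm u) hGS
  set period := PySem.Int.floordiv m G with hperiod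
  have hpediv : period = m / G := PySem.Int.floordiv_eq_ediv_of_pos hGpos
  have hGp : G * period = m := by rw [hpediv]; exact Int.mul_ediv_cancel' hGm
  have hppos : 0 < period := by nlinarith
  set w := PySem.Int.floordiv c G * x with hw
  set k0 := PySem.Int.mod w period with hk0
  have hk00 : 0 ≤ k0 := PySem.Int.mod_nonneg _ hppos
  have hk0p : k0 < period := PySem.Int.mod_lt _ hppos
  have hwk : period ∣ (w - k0) := by
    have := PySem.Int.floordiv_mul_add_mod w period
    exact ⟨PySem.Int.floordiv w period, by linarith⟩
  set j' := jump / G with hj'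
  have hjj : j' * G = jump := Int.ediv_mul_cancel hGj
  have hcfl : PySem.Int.floordiv c G * G = c := by
    rw [PySem.Int.floordiv_eq_ediv_of_pos hGpos]
    exact Int.ediv_mul_cancel hGc
  have hcop : IsCoprime j' period := by
    rw [Int.isCoprime_iff_gcd_eq_one]
    have hgpos' : 0 < Int.gcd jump m := Int.gcd_pos_of_ne_zero_right jump (ne_of_gt hmpos)
    have h1 := Int.gcd_ediv_gcd_ediv_gcd hgpos'
    rw [hj', hpediv, hGgcd]
    exact h1
  -- KEY1 : k0 is a solution
  have key1 : m ∣ S + k0 * jump := by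
    rcases hcS with ⟨u, hu⟩
    rcases hwk with ⟨q', hq'⟩
    set y := (egcdB jump m).2.2 with hy
    have hxy : jump * x = G - m * y := by linarith
    refine ⟨u - PySem.Int.floordiv c G * y - q' * j', ?_⟩
    have h1 : k0 = w - period * q' := by linarith
    rw [h1, hw]
    have hpj : period * jump = m * j' := by
      calc period * jump = period * (j' * G) := by rw [hjj]
        _ = (G * period) * j' := by ring
        _ = m * j' := by rw [hGp]
    calc S + (PySem.Int.floordiv c G * x - period * q') * jump
        = S + PySem.Int.floordiv c G * (jump * x) - q' * (period * jump) := by ring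
      _ = S + PySem.Int.floordiv c G * (G - m*y) - q' * (m * j') := by rw [hxy, hpj]
      _ = S + c - PySem.Int.floordiv c G * (m*y) - q' * (m * j') := by
            rw [mul_sub]; rw [hcfl]; ring
      _ = (m*u - c) + c - PySem.Int.floordiv c G * (m*y) - q' * (m * j') := by
            have : S = m*u - c := by linarith
            rw [this]
      _ = m * (u - PySem.Int.floordiv c G * y - q' * j') := by ring
  -- KEY2 : the solutions are exactly k0 + t*period
  have key2 : ∀ k : Int, m ∣ (S + k * jump) ↔ period ∣ (k - k0) := by
    intro k
    constructor
    · intro hk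
      have hdif : m ∣ (k - k0) * jump := by
        have := dvd_sub hk key1
        have h2 : S + k*jump - (S + k0*jump) = (k - k0)*jump := by ring
        rwa [h2] at this
      have : period * G ∣ ((k - k0) * j') * G := by
        rw [mul_comm period G, hGp]
        have : (k - k0) * j' * G = (k - k0) * jump := by rw [← hjj]; ring
        rwa [this]
      exact hcop.symm.dvd_of_dvd_mul_right ((mul_dvd_mul_iff_right hGne).1 this)
    · rintro ⟨t, ht⟩
      have : S + k * jump = (S + k0 * jump) + (period * t) * jump := by
        rw [← ht]; ring
      rw [this]
      refine dvd_add key1 ⟨t * j', ?_⟩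
      calc period * t * jump = (t * j') * (G * period) := by rw [← hjj]; ring
        _ = m * (t * j') := by rw [hGp]; ring
  have habs : ∀ z : Int, num ∣ z ↔ m ∣ z := fun z => (abs_dvd num z).symm
  set P := period.toNat with hP
  set K0 := k0.toNat with hK0
  have hPk : (P : Int) = period := Int.toNat_of_nonneg (le_of_lt hppos)
  have hKk : (K0 : Int) = k0 := Int.toNat_of_nonneg hk00
  have hKP : K0 < P := by omega
  have hmabs : m = (num.natAbs : Int) := by rw [hm, Int.abs_eq_natAbs]
  have hfuel : 2 * num.natAbs + 2 = (((2 * num.natAbs + 2 - (K0 + P + 1) + 1) + (P - 1)) + 1) + K0 := by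
    have : (K0:Int) + (P:Int) + 1 ≤ 2 * (num.natAbs:Int) + 2 := by
      rw [hKk, hPk]
      have : period ≤ (num.natAbs : Int) := by rw [← hmabs]; nlinarith
      omega
    omega
  show processALoop jump index num (2 * num.natAbs + 2) start [] = _
  rw [hfuel]
  rw [loop_skip jump index num K0 _ start [] h0 (by simp) ?side1]
  case side1 =>
    intro e he
    rw [habs]
    intro hdv
    have hsol : m ∣ S + (e:Int) * jump := by
      have h2 : start + (e:Int)*jump + index = S + (e:Int)*jump := by rw [hS]; ring
      rwa [h2] at hdv
    rcases (key2 _).1 hsol with ⟨t, ht⟩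
    have := Int.le_of_dvd (by omega : (0:Int) < -((e:Int) - k0)) (dvd_neg.2 ⟨t, ht⟩)
    omega
  rw [hKk]
  rw [loop_hit1 jump index num _ _ h0 (by
    rw [habs]
    have h2 : start + k0*jump + index = S + k0*jump := by rw [hS]; ring
    rw [h2]; exact key1)]
  rw [loop_skip jump index num (P-1) _ _ [start + k0*jump] h0 (by simp) ?side2]
  case side2 =>
    intro e he
    rw [habs]
    intro hdv
    have h2 : start + k0 * jump + jump + (e:Int)*jump + index = S + (k0 + 1 + (e:Int))*jump := by
      rw [hS]; ring
    rw [h2] at hdv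
    have hper := (key2 _).1 hdv
    have h3 : k0 + 1 + (e:Int) - k0 = 1 + (e:Int) := by ring
    rw [h3] at hper
    have := Int.le_of_dvd (by omega : (0:Int) < 1 + (e:Int)) hper
    omega
  have hP1 : ((P - 1 : Nat) : Int) = period - 1 := by omega
  rw [loop_hit2 jump index num _ _ _ h0 (by
    rw [habs, hP1]
    have h2 : start + k0*jump + jump + (period-1)*jump + index = S + (k0 + period)*jump := by
      rw [hS]; ring
    rw [h2]
    exact (key2 _).2 ⟨1, by ring⟩)]
  show _ = (start + k0 * jump, period * jump)
  rw [hP1]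
  congr 1; ring

-- ===== VERDICT (by name: the statement is the Claim_ definition above) =====
theorem process_py_spec : Claim_equal_process_py := by
  intro start jump index num _ hpre
  exact main_eq start jump index num hpre.1 hpre.2
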